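-- pv_equiv track=rewrite | github.com/denikryt/PeerTube-browser | dev/workflow_lib/feature_commands.py | _apply_issue_execution_order
-- ===== SOURCE A (Python) =====
-- def _apply_issue_execution_order(
--     tasks: list[dict[str, str]],
--     ordered_issue_rows: list[dict[str, str]],
-- ) -> list[dict[str, str]]:
--     """Sort tasks by feature plan Issue Execution Order, then keep original task order inside each issue."""
--     issue_order_index = {
--         str(row.get("id", "")).strip(): index
--         for index, row in enumerate(ordered_issue_rows)
--         if str(row.get("id", "")).strip()
--     }
--     fallback_start = len(issue_order_index) + 1
--     decorated: list[tuple[int, int, dict[str, str]]] = []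
--     for original_index, task in enumerate(tasks):
--         issue_id = str(task.get("issue_id", "")).strip()
--         decorated.append((issue_order_index.get(issue_id, fallback_start + original_index), original_index, task))
--     decorated.sort(key=lambda item: (item[0], item[1]))
--     return [item[2] for item in decorated]
-- ===== SOURCE B (Python) =====
-- def _apply_issue_execution_order(
--     tasks: list[dict[str, str]],
--     ordered_issue_rows: list[dict[str, str]],
-- ) -> list[dict[str, str]]:
--     """Bucket (counting) sort by Issue Execution Order: one linear pass, no comparison sort."""
--     issue_order_index = {}
--     for index, row in enumerate(ordered_issue_rows):
--         issue_id = str(row.get("id", "")).strip()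
--         if issue_id:
--             issue_order_index[issue_id] = index
--     fallback_start = len(issue_order_index) + 1
--     size = max(len(ordered_issue_rows), fallback_start + len(tasks))
--     buckets = [[] for _ in range(size)]
--     for original_index, task in enumerate(tasks):
--         issue_id = str(task.get("issue_id", "")).strip()
--         buckets[issue_order_index.get(issue_id, fallback_start + original_index)].append(task)
--     result = []
--     for bucket in buckets:
--         result.extend(bucket)
--     return result
-- ===== Notes on version B (the rewrite author's own statement) =====
-- stated objective: alternative
-- what changed: Replaces the decorate-sort-undecorate (stable comparison sort on (order, original_index) tuples) with a single-pass bucket/counting sort: each task is appended to the bucket of its exact sort key and the buckets are concatenated in key order.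
import Mathlib
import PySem

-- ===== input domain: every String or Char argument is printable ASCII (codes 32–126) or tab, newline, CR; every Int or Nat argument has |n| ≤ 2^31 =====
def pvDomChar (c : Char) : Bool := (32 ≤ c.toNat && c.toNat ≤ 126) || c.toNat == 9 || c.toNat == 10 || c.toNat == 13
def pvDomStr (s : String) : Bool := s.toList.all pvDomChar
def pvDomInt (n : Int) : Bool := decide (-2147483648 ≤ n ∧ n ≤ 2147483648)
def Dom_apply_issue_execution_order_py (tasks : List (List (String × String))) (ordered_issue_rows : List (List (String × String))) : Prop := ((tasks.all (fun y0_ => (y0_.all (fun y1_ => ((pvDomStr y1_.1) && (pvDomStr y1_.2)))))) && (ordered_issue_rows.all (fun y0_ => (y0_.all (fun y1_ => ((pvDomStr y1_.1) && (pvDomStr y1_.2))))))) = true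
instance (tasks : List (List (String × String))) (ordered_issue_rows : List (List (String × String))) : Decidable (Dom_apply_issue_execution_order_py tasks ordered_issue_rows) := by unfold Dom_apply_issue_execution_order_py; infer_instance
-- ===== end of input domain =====

-- ===== PORT A =====
-- B replaces A's decorate-sort-undecorate (stable comparison sort on (order, index) keys)
-- with a one-pass bucket sort over the same keys.

-- shared helper: str(row.get(key, "")).strip()  (both Pythons contain this expression)
def pvStripGet (row : List (String × String)) (key : String) : String :=
  PySem.Str.strip (PySem.Dict.getD ⟨row⟩ key "")

-- issue_order_index: {id: index for index, row in enumerate(ordered_issue_rows) if id} (last wins)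
def pvIssueOrderIndex (rows : List (List (String × String))) : PySem.Dict String Int :=
  (PySem.List.enumerate rows 0).foldl
    (fun d p => if pvStripGet p.2 "id" ≠ "" then d.insert (pvStripGet p.2 "id") p.1 else d)
    PySem.Dict.empty

-- fallback_start = len(issue_order_index) + 1
def pvFallbackStart (rows : List (List (String × String))) : Int :=
  ((pvIssueOrderIndex rows).size : Int) + 1

-- issue_order_index.get(issue_id, fallback_start + original_index) for p = (original_index, task)
def pvTaskKey (rows : List (List (String × String))) (p : Int × List (String × String)) : Int :=
  (pvIssueOrderIndex rows).getD (pvStripGet p.2 "issue_id") (pvFallbackStart rows + p.1)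

def apply_issue_execution_order_py (tasks : List (List (String × String))) (ordered_issue_rows : List (List (String × String))) : List (List (String × String)) :=
  -- decorated: for-loop appending (key, original_index, task)
  ((PySem.List.sorted2
      ((PySem.List.enumerate tasks 0).foldl
        (fun acc p => acc ++ [(pvTaskKey ordered_issue_rows p, p.1, p.2)]) [])
      (fun item => item.1) (fun item => item.2.1)   -- decorated.sort(key=lambda item: (item[0], item[1]))
    ).map (fun item => item.2.2))

-- ===== PORT B =====
-- size = max(len(ordered_issue_rows), fallback_start + len(tasks))
def pvBucketCount (tasks : List (List (String × String))) (rows : List (List (String × String))) : Int :=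
  max (rows.length : Int) (pvFallbackStart rows + (tasks.length : Int))

def apply_issue_execution_order_py_alt (tasks : List (List (String × String))) (ordered_issue_rows : List (List (String × String))) : List (List (String × String)) :=
  -- buckets = [[] for _ in range(size)]; then one pass appending each task into its bucket;
  -- buckets[k].append(task) is rendered as pySetD bs k (pyGetD bs k [] ++ [task]); finally extend in order.
  (((PySem.List.enumerate tasks 0).foldl
      (fun bs p => PySem.List.pySetD bs (pvTaskKey ordered_issue_rows p)
        (PySem.List.pyGetD bs (pvTaskKey ordered_issue_rows p) [] ++ [p.2]))
      ((PySem.List.pyRange 0 (pvBucketCount tasks ordered_issue_rows) 1).map (fun _ => ([] : List (List (String × String)))))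
    ).foldl (fun result bucket => result ++ bucket) [])

-- ===== PRECONDITION & SPEC =====
def Spec_apply_issue_execution_order_py (tasks : List (List (String × String))) (ordered_issue_rows : List (List (String × String))) (out : List (List (String × String))) : Prop := out = apply_issue_execution_order_py_alt tasks ordered_issue_rows
instance (tasks : List (List (String × String))) (ordered_issue_rows : List (List (String × String))) (out : List (List (String × String))) : Decidable (Spec_apply_issue_execution_order_py tasks ordered_issue_rows out) := by unfold Spec_apply_issue_execution_order_py; infer_instance

-- ===== CLAIM (what is proved, stated in full; the proofs are below) =====
def Claim_equal_apply_issue_execution_order_py : Prop := ∀ (tasks : List (List (String × String))) (ordered_issue_rows : List (List (String × String))), Dom_apply_issue_execution_order_py tasks ordered_issue_rows → Spec_apply_issue_execution_order_py tasks ordered_issue_rows (apply_issue_execution_order_py tasks ordered_issue_rows)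

-- ===== LEMMAS AND PROOFS =====

lemma pv_dictFold_get?_bounds (l : List (Int × List (String × String))) (d : PySem.Dict String Int)
    (lo hi : Int)
    (hd : ∀ k v, d.get? k = some v → lo ≤ v ∧ v < hi)
    (hl : ∀ p ∈ l, lo ≤ p.1 ∧ p.1 < hi) :
    ∀ k v,
      (l.foldl (fun d p => if pvStripGet p.2 "id" ≠ "" then d.insert (pvStripGet p.2 "id") p.1 else d) d).get? k = some v →
      lo ≤ v ∧ v < hi := by
  induction l generalizing d with
  | nil => simpa using hd
  | cons p l ih =>
    intro k v h
    refine ih _ ?_ (fun q hq => hl q (by simp [hq])) k v h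
    intro k' v' h'
    beta_reduce at h'
    by_cases hne : pvStripGet p.2 "id" ≠ ""
    · rw [if_pos hne, PySem.Dict.get?_insert] at h'
      split at h'
      · cases h'; exact hl p (by simp)
      · exact hd _ _ h'
    · rw [if_neg hne] at h'
      exact hd _ _ h'

lemma pv_index_get?_bounds (rows : List (List (String × String))) :
    ∀ k v, (pvIssueOrderIndex rows).get? k = some v → 0 ≤ v ∧ v < (rows.length : Int) := by
  intro k v h
  refine pv_dictFold_get?_bounds _ _ 0 (rows.length : Int) (by simp [PySem.Dict.get?_empty]) ?_ k v h
  intro p hp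
  obtain ⟨j, hj, rfl⟩ := (PySem.List.mem_enumerate_iff _ _ _).1 hp
  simp; omega

lemma pv_fallback_pos (rows : List (List (String × String))) : 1 ≤ pvFallbackStart rows := by
  unfold pvFallbackStart
  have := Int.natCast_nonneg (pvIssueOrderIndex rows).size
  omega

lemma pv_key_bounds (tasks rows : List (List (String × String))) :
    ∀ p ∈ PySem.List.enumerate tasks 0,
      0 ≤ pvTaskKey rows p ∧ pvTaskKey rows p < pvBucketCount tasks rows := by
  intro p hp
  obtain ⟨j, hj, rfl⟩ := (PySem.List.mem_enumerate_iff _ _ _).1 hp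
  have hfb := pv_fallback_pos rows
  unfold pvTaskKey pvBucketCount
  rw [PySem.Dict.getD_eq_get?_getD]
  cases h : (pvIssueOrderIndex rows).get? (pvStripGet (0 + ↑j, tasks[j]).2 "issue_id") with
  | none =>
      simp only [Option.getD_none]
      constructor
      · simp; omega
      · have hjl : (j:Int) < (tasks.length : Int) := by exact_mod_cast hj
        simp only [lt_max_iff]; right; omega
  | some v =>
      have := pv_index_get?_bounds rows _ _ h
      simp only [Option.getD_some, lt_max_iff]
      exact ⟨this.1, Or.inl this.2⟩

lemma pv_sorted2_eq_sorted_lex {A : Type} (xs : List A) (k1 k2 : A → Int) :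
    PySem.List.sorted2 xs k1 k2 = PySem.List.sorted xs (fun a => toLex (k1 a, k2 a)) := by
  unfold PySem.List.sorted2 PySem.List.sorted
  have hb : (fun a b => decide (k1 a < k1 b) || (!decide (k1 b < k1 a) && decide (k2 a < k2 b)))
      = (fun a b : A => decide ((toLex (k1 a, k2 a) : Lex (Int × Int)) < toLex (k1 b, k2 b))) := by
    funext a b
    by_cases h1 : k1 a < k1 b <;> by_cases h2 : k1 b < k1 a <;> by_cases h3 : k2 a < k2 b <;>
      simp [h1, h2, h3, Prod.Lex.lt_iff] <;> omega
  simp only [if_neg (by decide : ¬(false = true)), hb]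

lemma pv_flatMap_ite_perm {T : Type} (x : T) (kx : Int) (vs : List Int) (g : Int → List T)
    (hnd : vs.Nodup) (hx : kx ∈ vs) :
    (vs.flatMap (fun v => if kx = v then x :: g v else g v)).Perm (x :: vs.flatMap g) := by
  induction vs with
  | nil => simp at hx
  | cons v vs ih =>
    rcases List.nodup_cons.1 hnd with ⟨hv, hnd'⟩
    by_cases h : kx = v
    · subst h
      have hnot : ∀ w ∈ vs, ¬ (kx = w) := fun w hw he => hv (he ▸ hw)
      have : vs.flatMap (fun v => if kx = v then x :: g v else g v) = vs.flatMap g := by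
        exact List.flatMap_congr (fun w hw => if_neg (hnot w hw))
      simp only [List.flatMap_cons, this]
      exact List.Perm.refl _
    · have hx' : kx ∈ vs := by rcases List.mem_cons.1 hx with h' | h'; exact absurd h' h; exact h'
      have := ih hnd' hx'
      have h1 : (v :: vs).flatMap (fun w => if kx = w then x :: g w else g w)
          = g v ++ vs.flatMap (fun w => if kx = w then x :: g w else g w) := by
        simp [List.flatMap_cons, if_neg h]
      have h2 := List.Perm.append_left (g v) this
      have h3 : (g v ++ (x :: vs.flatMap g)).Perm (x :: (g v ++ vs.flatMap g)) := List.perm_middle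
      rw [h1, List.flatMap_cons]
      exact h2.trans h3

lemma pv_flatMap_filter_perm {T : Type} (key : T → Int) (vs : List Int) (hnd : vs.Nodup) :
    ∀ (l : List T), (∀ e ∈ l, key e ∈ vs) →
      (vs.flatMap (fun v => l.filter (fun e => decide (key e = v)))).Perm l := by
  intro l
  induction l with
  | nil => intro _; simp
  | cons x l ih =>
    intro hmem
    have hx : key x ∈ vs := hmem x (by simp)
    have hstep : vs.flatMap (fun v => (x :: l).filter (fun e => decide (key e = v)))
        = vs.flatMap (fun v => if key x = v then x :: l.filter (fun e => decide (key e = v))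
            else l.filter (fun e => decide (key e = v))) := by
      apply List.flatMap_congr
      intro v _
      by_cases h : key x = v <;> simp [h]
    rw [hstep]
    refine (pv_flatMap_ite_perm x (key x) vs _ hnd hx).trans ?_
    exact (ih (fun e he => hmem e (by simp [he]))).cons x

lemma pv_pySetD_length {α : Type} (xs : List α) (i : Int) (v : α) :
    (PySem.List.pySetD xs i v).length = xs.length := by
  unfold PySem.List.pySetD PySem.List.pySet?
  cases h : PySem.List.pyIdx? xs.length i <;> simp

lemma pv_bucket_foldl (c : (Int × List (String × String)) → Int) :
    ∀ (L : List (Int × List (String × String))) (bs : List (List (List (String × String)))),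
      (∀ p ∈ L, 0 ≤ c p ∧ c p < (bs.length : Int)) →
      L.foldl (fun bs p => PySem.List.pySetD bs (c p) (PySem.List.pyGetD bs (c p) [] ++ [p.2])) bs
        = (List.range bs.length).map
            (fun j => bs.getD j [] ++ (L.filter (fun p => decide (c p = (j : Int)))).map (fun p => p.2)) := by
  intro L
  induction L with
  | nil =>
    intro bs _
    simp only [List.foldl_nil, List.filter_nil, List.map_nil, List.append_nil]
    apply List.ext_getElem (by simp)
    intro j h1 h2
    simp [List.getD_eq_getElem?_getD, List.getElem?_eq_getElem (by simpa using h2)]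
  | cons p L ih =>
    intro bs hb
    have hp := hb p (by simp)
    have hlen : ((PySem.List.pySetD bs (c p) (PySem.List.pyGetD bs (c p) [] ++ [p.2])).length : Int)
        = (bs.length : Int) := by rw [pv_pySetD_length]
    rw [List.foldl_cons, ih _ (fun q hq => by rw [hlen]; exact hb q (by simp [hq]))]
    rw [pv_pySetD_length]
    apply List.map_congr_left
    intro j hj
    have hjlt : j < bs.length := List.mem_range.1 hj
    have hset := PySem.List.pySetD_of_nonneg bs (PySem.List.pyGetD bs (c p) [] ++ [p.2]) hp.1
    rw [hset]
    have hget := PySem.List.pyGetD_of_nonneg bs ([] : List (List (String × String))) hp.1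
    by_cases hcj : c p = (j : Int)
    · have htn : (c p).toNat = j := by omega
      simp only [List.getD_eq_getElem?_getD, List.filter_cons, hcj, decide_true, if_pos]
      simp [hjlt]
    · have htn : (c p).toNat ≠ j := by omega
      simp only [List.getD_eq_getElem?_getD, List.getElem?_set_ne htn, List.filter_cons, hcj,
        decide_false]
      simp

lemma pv_main (tasks rows : List (List (String × String))) :
    apply_issue_execution_order_py tasks rows = apply_issue_execution_order_py_alt tasks rows := by
  have hfb := pv_fallback_pos rows
  have hkb := pv_key_bounds tasks rows
  set L := PySem.List.enumerate tasks 0 with hL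
  set N : Nat := (pvBucketCount tasks rows).toNat with hN
  have hBC : pvBucketCount tasks rows = (N : Int) := by
    have h0 : (0:Int) ≤ pvBucketCount tasks rows := le_trans (by positivity) (le_max_left _ _)
    omega
  have hkb' : ∀ p ∈ L, 0 ≤ pvTaskKey rows p ∧ pvTaskKey rows p < (N : Int) := by
    intro p hp; have := hkb p hp; omega
  set F : Nat → List (List (String × String)) :=
    fun j => (L.filter (fun p => decide (pvTaskKey rows p = (j : Int)))).map (fun p => p.2) with hF
  -- ===== A side =====
  have hA : apply_issue_execution_order_py tasks rows = ((List.range N).map F).flatten := by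
    unfold apply_issue_execution_order_py
    rw [PySem.List.foldl_append_singleton_eq_map (fun p => (pvTaskKey rows p, p.1, p.2)) _ []]
    rw [pv_sorted2_eq_sorted_lex]
    set f : Int × List (String × String) → Int × Int × List (String × String) :=
      fun p => (pvTaskKey rows p, p.1, p.2) with hf
    set D := (PySem.List.enumerate tasks 0).map f with hD
    set vs : List Int := List.map (fun j : Nat => (j : Int)) (List.range N) with hvs
    have hnd : vs.Nodup :=
      List.Nodup.map (fun a b h => Nat.cast_injective h) List.nodup_range
    have hmemD : ∀ e ∈ D, e.1 ∈ vs := by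
      intro e he
      obtain ⟨p, hp, rfl⟩ := List.mem_map.1 he
      obtain ⟨h0, h1⟩ := hkb' p hp
      refine List.mem_map.2 ⟨(pvTaskKey rows p).toNat, List.mem_range.2 (by omega), ?_⟩
      show ((pvTaskKey rows p).toNat : Int) = (f p).1
      have : (f p).1 = pvTaskKey rows p := rfl
      rw [this]; omega
    have hperm : (vs.flatMap (fun v => D.filter (fun e => decide (e.1 = v)))).Perm D :=
      pv_flatMap_filter_perm (fun e => e.1) vs hnd D hmemD
    have hDsnd : D.Pairwise (fun a b => a.2.1 < b.2.1) := by
      rw [hD, List.pairwise_map]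
      exact PySem.List.pairwise_lt_enumerate tasks 0
    have hpw : (vs.flatMap (fun v => D.filter (fun e => decide (e.1 = v)))).Pairwise
        (fun a b => (toLex (a.1, a.2.1) : Lex (Int × Int)) < toLex (b.1, b.2.1)) := by
      rw [List.flatMap_def]
      refine List.pairwise_flatten.2 ⟨?_, ?_⟩
      · intro b hb
        obtain ⟨v, hv, rfl⟩ := List.mem_map.1 hb
        have hsub : (D.filter (fun e => decide (e.1 = v))).Pairwise (fun a b => a.2.1 < b.2.1) :=
          List.Pairwise.sublist List.filter_sublist hDsnd
        refine hsub.imp_of_mem ?_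
        intro a b ha hb hab
        have ha1 : a.1 = v := by simpa using (List.mem_filter.1 ha).2
        have hb1 : b.1 = v := by simpa using (List.mem_filter.1 hb).2
        exact Prod.Lex.lt_iff.2 (Or.inr ⟨by simp [ha1, hb1], by simpa using hab⟩)
      · rw [List.pairwise_map, hvs, List.pairwise_map]
        refine List.pairwise_lt_range.imp_of_mem ?_
        intro v w _ _ hvw x hx y hy
        have hx1 : x.1 = (v:Int) := by simpa using (List.mem_filter.1 hx).2
        have hy1 : y.1 = (w:Int) := by simpa using (List.mem_filter.1 hy).2
        refine Prod.Lex.lt_iff.2 (Or.inl ?_)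
        simp only [ofLex_toLex]
        rw [hx1, hy1]
        exact_mod_cast hvw
    rw [List.nil_append, PySem.List.sorted_eq_of_perm_of_pairwise_lt D _ _ hperm hpw]
    rw [List.map_flatMap, hvs, List.flatMap_def, List.map_map]
    congr 1
    apply List.map_congr_left
    intro j _
    show ((D.filter (fun e => decide (e.1 = ((j:Nat) : Int)))).map (fun item => item.2.2)) = F j
    rw [hD, List.filter_map, List.map_map]
    have h1 : ((fun e : Int × Int × List (String × String) => decide (e.1 = ((j:Nat):Int))) ∘ f)
        = (fun p => decide (pvTaskKey rows p = ((j:Nat):Int))) := rfl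
    have h2 : ((fun item : Int × Int × List (String × String) => item.2.2) ∘ f)
        = (fun p : Int × List (String × String) => p.2) := rfl
    rw [h1, h2, hF]
  -- ===== B side =====
  have hB : apply_issue_execution_order_py_alt tasks rows = ((List.range N).map F).flatten := by
    unfold apply_issue_execution_order_py_alt
    rw [hBC, PySem.List.pyRange_zero_natCast, List.map_map]
    set bs0 : List (List (List (String × String))) :=
      (List.range N).map ((fun _ => []) ∘ (fun k : Nat => (k : Int))) with hbs0
    have hlen0 : bs0.length = N := by simp [hbs0]
    have hget0 : ∀ j, bs0.getD j ([] : List (List (String × String))) = [] := by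
      intro j
      rcases lt_or_ge j bs0.length with h | h
      · rw [List.getD_eq_getElem _ _ h]; simp [hbs0]
      · exact List.getD_eq_default _ _ h
    rw [pv_bucket_foldl (pvTaskKey rows) L bs0 (by rw [hlen0]; exact hkb')]
    rw [PySem.List.foldl_append_eq_flatMap (fun b => b) _ []]
    rw [List.nil_append, List.flatMap_def, List.map_map, hlen0]
    congr 1
    apply List.map_congr_left
    intro j _
    show (fun b => b) (bs0.getD j [] ++ (L.filter (fun p => decide (pvTaskKey rows p = (j:Int)))).map (fun p => p.2)) = F j
    rw [hget0, hF]
    simp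
  rw [hA, hB]

-- ===== VERDICT (by name: the statement is the Claim_ definition above) =====
theorem apply_issue_execution_order_py_spec : Claim_equal_apply_issue_execution_order_py := by
  intro tasks rows _
  unfold Spec_apply_issue_execution_order_py
  exact pv_main tasks rows
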